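-- pv_equiv track=rewrite | github.com/VittorioCosta/python-programs | stampa e calcola barcode.py | printBarcode
-- ===== SOURCE A (Python) =====
-- Cifra1 = ":::||"
--
-- Cifra2 = "::|:|"
--
-- Cifra3 = "::||:"
--
-- Cifra4 = ":|::|"
--
-- Cifra5 = ":|:|:"
--
-- Cifra6 = ":||::"
--
-- Cifra7 = "|:::|"
--
-- Cifra8 = "|::|:"
--
-- Cifra9 = "|:|::"
--
-- Cifra0 = "||:::"
--
-- Climit = "|"
--
-- def printBarcode(postcode):
--     b = digitControl(postcode)
--     postcode1=str(postcode)
--     a = ""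
--     for n in range(0, len(postcode1)):
--         if postcode1[n]=="1":a=a+Cifra1
--         elif postcode1[n]=="2":a=a+Cifra2
--         elif postcode1[n]=="3":a=a+Cifra3
--         elif postcode1[n]=="4":a=a+Cifra4
--         elif postcode1[n]=="5":a=a+Cifra5
--         elif postcode1[n]=="6":a=a+Cifra6
--         elif postcode1[n]=="7":a=a+Cifra7
--         elif postcode1[n]=="8":a=a+Cifra8
--         elif postcode1[n]=="9":a=a+Cifra9
--         elif postcode1[n]=="0":a=a+Cifra0
--     barcode = Climit + a + b + Climit
--     return barcode
--
-- def digitControl(postcode):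
--     postcode = str(postcode)
--     a = []
--     c = 0
--     lista = (0,1,2,3,4,5,6,7,8,9)
--     for n in range(0, len(postcode)):
--         b = postcode[n]
--         b = int(b)
--         a.append(b)
--     for n in range(0,len(a)):
--         c = c + a[n]
--     for n in range(0,len(lista)):
--         if (c + lista[n])%10 == 0: d = lista[n]
--     if d == 1: d = Cifra1
--     elif d == 2: d = Cifra2
--     elif d == 3: d = Cifra3
--     elif d == 4: d = Cifra4
--     elif d == 5: d = Cifra5
--     elif d == 6: d = Cifra6
--     elif d == 7: d = Cifra7
--     elif d == 8: d = Cifra8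
--     elif d == 9: d = Cifra9
--     elif d == 0: d = Cifra0
--     return d
-- ===== SOURCE B (Python) =====
-- # The bar patterns are the standard 2-of-5 code with position weights 7,4,2,1,0:
-- # digit d's symbol has bars exactly at the unique pair of positions i<j with
-- # (W[i]+W[j]) % 11 == d (0 is encoded as 7+4=11).  B generates each symbol from
-- # that arithmetic rule instead of storing ten pattern strings, and builds the
-- # whole barcode in ONE recursive pass that accumulates the digit sum and emits
-- # the check symbol (digit -sum % 10) at the base case.
-- W = (7, 4, 2, 1, 0)
--
-- def _symbol(d):
--     for i in range(5):
--         for j in range(i + 1, 5):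
--             if (W[i] + W[j]) % 11 == d:
--                 return ''.join('|' if k == i or k == j else ':' for k in range(5))
--     return ''
--
-- def printBarcode(postcode):
--     def go(chars, total):
--         if not chars:
--             return _symbol(-total % 10) + '|'
--         d = int(chars[0])
--         return _symbol(d) + go(chars[1:], total + d)
--     return '|' + go(str(postcode), 0)
-- ===== Notes on version B (the rewrite author's own statement) =====
-- stated objective: alternative
-- what changed: B stores no pattern table at all: it derives each 5-bar symbol from the 2-of-5 weight rule (bars at the unique positions i<j with (W[i]+W[j])%11 == d, W=(7,4,2,1,0)), and replaces A's four staged loops (parse list, sum loop, 0..9 search, separate encoding loop) by one recursive pass that encodes while accumulating the digit sum and appends the check symbol for -sum%10 at the base case.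
import Mathlib
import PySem

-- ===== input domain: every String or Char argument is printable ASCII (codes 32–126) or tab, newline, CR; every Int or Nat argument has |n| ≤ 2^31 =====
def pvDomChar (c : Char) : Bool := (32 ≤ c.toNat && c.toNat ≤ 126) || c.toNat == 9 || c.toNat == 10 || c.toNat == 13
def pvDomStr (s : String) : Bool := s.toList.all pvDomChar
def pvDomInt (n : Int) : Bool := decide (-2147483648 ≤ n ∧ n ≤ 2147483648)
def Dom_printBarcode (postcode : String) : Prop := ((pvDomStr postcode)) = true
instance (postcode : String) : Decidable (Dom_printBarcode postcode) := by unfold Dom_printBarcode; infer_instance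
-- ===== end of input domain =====

-- B derives each 5-bar symbol from the 2-of-5 weight rule (bars at the pair i<j with
-- (W[i]+W[j])%11 = d, W=(7,4,2,1,0)) instead of a pattern table, and builds the barcode in
-- one recursive pass accumulating the digit sum; equivalence proved on digit strings.


-- ===== PORT A =====
def pvCifra1 : List Char := ":::||".toList
def pvCifra2 : List Char := "::|:|".toList
def pvCifra3 : List Char := "::||:".toList
def pvCifra4 : List Char := ":|::|".toList
def pvCifra5 : List Char := ":|:|:".toList
def pvCifra6 : List Char := ":||::".toList
def pvCifra7 : List Char := "|:::|".toList
def pvCifra8 : List Char := "|::|:".toList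
def pvCifra9 : List Char := "|:|::".toList
def pvCifra0 : List Char := "||:::".toList

-- the trailing if-chain of digitControl; Python has no final else (d stays an int there),
-- but that branch is unreachable since d ∈ 0..9; we return [] there.
def pvCifraOf (d : Int) : List Char :=
  if d = 1 then pvCifra1
  else if d = 2 then pvCifra2
  else if d = 3 then pvCifra3
  else if d = 4 then pvCifra4
  else if d = 5 then pvCifra5
  else if d = 6 then pvCifra6
  else if d = 7 then pvCifra7
  else if d = 8 then pvCifra8
  else if d = 9 then pvCifra9
  else if d = 0 then pvCifra0
  else []

def pvDigitControl (postcode : String) : List Char :=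
  let pc := postcode.toList
  let a : List Int := (PySem.List.pyRange 0 (pc.length : Int) 1).foldl
    (fun a n => a ++ [(PySem.Int.ofChars? [PySem.List.pyGetD pc n ' ']).getD 0]) []
  let c : Int := (PySem.List.pyRange 0 (a.length : Int) 1).foldl
    (fun c n => c + PySem.List.pyGetD a n 0) 0
  let lista : List Int := [0,1,2,3,4,5,6,7,8,9]
  let d : Int := (PySem.List.pyRange 0 (lista.length : Int) 1).foldl
    (fun d n => if PySem.Int.mod (c + PySem.List.pyGetD lista n 0) 10 = 0
                then PySem.List.pyGetD lista n 0 else d) 0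
  pvCifraOf d

def printBarcode (postcode : String) : String :=
  let b := pvDigitControl postcode
  let pc := postcode.toList
  let a : List Char := (PySem.List.pyRange 0 (pc.length : Int) 1).foldl
    (fun a n =>
      let ch := PySem.List.pyGetD pc n ' '
      if ch = '1' then a ++ pvCifra1
      else if ch = '2' then a ++ pvCifra2
      else if ch = '3' then a ++ pvCifra3
      else if ch = '4' then a ++ pvCifra4
      else if ch = '5' then a ++ pvCifra5
      else if ch = '6' then a ++ pvCifra6
      else if ch = '7' then a ++ pvCifra7
      else if ch = '8' then a ++ pvCifra8
      else if ch = '9' then a ++ pvCifra9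
      else if ch = '0' then a ++ pvCifra0
      else a) []
  String.ofList ('|' :: a ++ b ++ ['|'])

-- ===== PORT B =====
def pvW : List Int := [7, 4, 2, 1, 0]

-- _symbol's nested 'for i / for j' loops with early return = first match over the
-- pairs (i,j), i<j, in loop order
def pvSymbolGo (d : Int) (pairs : List (Int × Int)) : List Char :=
  match pairs with
  | [] => []
  | (i, j) :: rest =>
    if PySem.Int.mod (PySem.List.pyGetD pvW i 0 + PySem.List.pyGetD pvW j 0) 11 = d
    then (PySem.List.pyRange 0 5 1).map (fun k => if k = i ∨ k = j then '|' else ':')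
    else pvSymbolGo d rest

def pvSymbol (d : Int) : List Char :=
  pvSymbolGo d ((PySem.List.pyRange 0 5 1).flatMap
    (fun i => (PySem.List.pyRange (i + 1) 5 1).map (fun j => (i, j))))

def pvGo : List Char → Int → List Char
  | [], total => pvSymbol (PySem.Int.mod (-total) 10) ++ ['|']
  | c :: rest, total =>
    let d := (PySem.Int.ofChars? [c]).getD 0
    pvSymbol d ++ pvGo rest (total + d)

def printBarcode_alt (postcode : String) : String :=
  String.ofList ('|' :: pvGo postcode.toList 0)

-- ===== PRECONDITION & SPEC =====
-- Pre_ excludes exactly the inputs containing a non-digit character, on which A's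
-- int(b) raises ValueError (so A returns nothing there).
def Pre_printBarcode (postcode : String) : Prop :=
  (postcode.toList.all (fun c => (['0','1','2','3','4','5','6','7','8','9'] : List Char).contains c)) = true
instance (postcode : String) : Decidable (Pre_printBarcode postcode) := by
  unfold Pre_printBarcode; infer_instance

def pvWitness_printBarcode : String := "0"

def Spec_printBarcode (postcode : String) (out : String) : Prop := out = printBarcode_alt postcode
instance (postcode : String) (out : String) : Decidable (Spec_printBarcode postcode out) := by unfold Spec_printBarcode; infer_instance

-- ===== CLAIM =====
def Claim_equal_printBarcode : Prop := ∀ (postcode : String), Dom_printBarcode postcode → Pre_printBarcode postcode → Spec_printBarcode postcode (printBarcode postcode)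

-- ===== LEMMAS AND PROOFS =====

def pvDig (ch : Char) : Int := (PySem.Int.ofChars? [ch]).getD 0

-- the first loop of digitControl: a = [int(ch) for positions] is the per-char int map
theorem pvL1 (pc : List Char) :
    (PySem.List.pyRange 0 (pc.length : Int) 1).foldl
      (fun a n => a ++ [(PySem.Int.ofChars? [PySem.List.pyGetD pc n ' ']).getD 0]) []
    = pc.map pvDig := by
  have h1 := PySem.List.foldl_pyRange_zero_pyGetD' pc ' '
      (fun a x => a ++ [(PySem.Int.ofChars? [x]).getD 0]) []
  have h2 := PySem.List.foldl_append_singleton_eq_map pvDig pc ([] : List Int)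
  exact h1.trans (by simpa [pvDig] using h2)

-- the second loop of digitControl: c = sum of the list
theorem pvL2 (a : List Int) :
    (PySem.List.pyRange 0 (a.length : Int) 1).foldl
      (fun c n => c + PySem.List.pyGetD a n 0) 0 = a.sum := by
  have h1 := PySem.List.foldl_pyRange_zero_pyGetD' a 0 (fun (c : Int) x => c + x) 0
  have h2 := PySem.List.foldl_add a id 0
  exact h1.trans (by simpa using h2)

-- A's linear search over 0..9 for the n with (c+n)%10==0 yields (10 - c%10)%10
theorem pvL3 (c : Int) :
    (PySem.List.pyRange 0 ((([0,1,2,3,4,5,6,7,8,9] : List Int)).length : Int) 1).foldl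
      (fun d n => if PySem.Int.mod (c + PySem.List.pyGetD ([0,1,2,3,4,5,6,7,8,9] : List Int) n 0) 10 = 0
                  then PySem.List.pyGetD ([0,1,2,3,4,5,6,7,8,9] : List Int) n 0 else d) 0
    = PySem.Int.mod (10 - PySem.Int.mod c 10) 10 := by
  have h1 := PySem.List.foldl_pyRange_zero_pyGetD' ([0,1,2,3,4,5,6,7,8,9] : List Int) 0
      (fun d x => if PySem.Int.mod (c + x) 10 = 0 then x else d) 0
  refine Eq.trans h1 ?_
  simp only [List.foldl_cons, List.foldl_nil,
    PySem.Int.mod_eq_emod_of_pos (by norm_num : (0:Int) < 10)]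
  split_ifs <;> omega

-- B's arithmetic symbol rule reproduces the ten pattern constants
theorem pvSymbol_eq_cifra (d : Int) (h0 : 0 ≤ d) (h9 : d < 10) :
    pvSymbol d = pvCifraOf d := by
  interval_cases d <;> decide

-- one encoder branch equals B's symbol of the parsed digit, for a digit character
theorem pvEncChar (ch : Char) (h : ch ∈ (['0','1','2','3','4','5','6','7','8','9'] : List Char))
    (a : List Char) :
    (if ch = '1' then a ++ pvCifra1
     else if ch = '2' then a ++ pvCifra2
     else if ch = '3' then a ++ pvCifra3
     else if ch = '4' then a ++ pvCifra4
     else if ch = '5' then a ++ pvCifra5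
     else if ch = '6' then a ++ pvCifra6
     else if ch = '7' then a ++ pvCifra7
     else if ch = '8' then a ++ pvCifra8
     else if ch = '9' then a ++ pvCifra9
     else if ch = '0' then a ++ pvCifra0
     else a)
    = a ++ pvSymbol (pvDig ch) := by
  fin_cases h <;> simp [pvDig] <;> decide

-- the encoder loop of printBarcode is a flatMap of B's symbols
theorem pvL4 (pc : List Char) (h : ∀ c ∈ pc, c ∈ (['0','1','2','3','4','5','6','7','8','9'] : List Char)) :
    (PySem.List.pyRange 0 (pc.length : Int) 1).foldl
      (fun a n =>
        if PySem.List.pyGetD pc n ' ' = '1' then a ++ pvCifra1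
        else if PySem.List.pyGetD pc n ' ' = '2' then a ++ pvCifra2
        else if PySem.List.pyGetD pc n ' ' = '3' then a ++ pvCifra3
        else if PySem.List.pyGetD pc n ' ' = '4' then a ++ pvCifra4
        else if PySem.List.pyGetD pc n ' ' = '5' then a ++ pvCifra5
        else if PySem.List.pyGetD pc n ' ' = '6' then a ++ pvCifra6
        else if PySem.List.pyGetD pc n ' ' = '7' then a ++ pvCifra7
        else if PySem.List.pyGetD pc n ' ' = '8' then a ++ pvCifra8
        else if PySem.List.pyGetD pc n ' ' = '9' then a ++ pvCifra9
        else if PySem.List.pyGetD pc n ' ' = '0' then a ++ pvCifra0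
        else a) []
    = pc.flatMap (fun ch => pvSymbol (pvDig ch)) := by
  have h1 := PySem.List.foldl_pyRange_zero_pyGetD' pc ' '
      (fun (a : List Char) ch =>
        if ch = '1' then a ++ pvCifra1
        else if ch = '2' then a ++ pvCifra2
        else if ch = '3' then a ++ pvCifra3
        else if ch = '4' then a ++ pvCifra4
        else if ch = '5' then a ++ pvCifra5
        else if ch = '6' then a ++ pvCifra6
        else if ch = '7' then a ++ pvCifra7
        else if ch = '8' then a ++ pvCifra8
        else if ch = '9' then a ++ pvCifra9
        else if ch = '0' then a ++ pvCifra0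
        else a) []
  refine Eq.trans h1 ?_
  rw [PySem.List.foldl_congr_mem pc _
      (fun a ch => a ++ pvSymbol (pvDig ch)) []
      (fun acc x hx => pvEncChar x (h x hx) acc)]
  simpa using PySem.List.foldl_append_eq_flatMap (fun ch => pvSymbol (pvDig ch)) pc []

-- B's single recursive pass unfolded: body ++ check symbol ++ '|'
theorem pvGo_eq (chars : List Char) (total : Int) :
    pvGo chars total
    = chars.flatMap (fun ch => pvSymbol (pvDig ch))
      ++ pvSymbol (PySem.Int.mod (-(total + (chars.map pvDig).sum)) 10) ++ ['|'] := by
  induction chars generalizing total with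
  | nil => simp [pvGo]
  | cons c rest ih =>
    simp only [pvGo, List.flatMap_cons, List.map_cons, List.sum_cons, List.append_assoc]
    rw [show (PySem.Int.ofChars? [c]).getD 0 = pvDig c from rfl, ih (total + pvDig c),
      show -(total + pvDig c + (List.map pvDig rest).sum)
         = -(total + (pvDig c + (List.map pvDig rest).sum)) from by ring]
    simp [List.append_assoc]

-- Python's -c % 10 equals (10 - c % 10) % 10
theorem pvModNeg (c : Int) :
    PySem.Int.mod (-c) 10 = PySem.Int.mod (10 - PySem.Int.mod c 10) 10 := by
  simp only [PySem.Int.mod_eq_emod_of_pos (by norm_num : (0:Int) < 10)]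
  omega

-- ===== VERDICT =====
theorem printBarcode_spec : Claim_equal_printBarcode := by
  intro s _ hpre
  have hpre' : ∀ c ∈ s.toList, c ∈ (['0','1','2','3','4','5','6','7','8','9'] : List Char) :=
    fun c hc => by simpa using List.all_eq_true.mp hpre c hc
  show printBarcode s = printBarcode_alt s
  simp only [printBarcode, printBarcode_alt, pvDigitControl]
  rw [pvL1, pvL2, pvL3, pvL4 s.toList hpre', pvGo_eq]
  have hchk : PySem.Int.mod (-(0 + (s.toList.map pvDig).sum)) 10
      = PySem.Int.mod (10 - PySem.Int.mod (s.toList.map pvDig).sum 10) 10 := by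
    rw [Int.zero_add]; exact pvModNeg _
  rw [hchk, pvSymbol_eq_cifra _ (PySem.Int.mod_nonneg _ (by norm_num))
        (PySem.Int.mod_lt _ (by norm_num))]
  simp
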